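-- pv_equiv track=rewrite | github.com/HenryGreene10/propertyfish | backend/app/ingestion/framework.py | _safe_identifier
-- ===== SOURCE A (Python) =====
-- def _safe_identifier(name: str) -> str:
--     if not name:
--         raise ValueError("Identifier cannot be empty.")
--     parts = name.split(".")
--     for part in parts:
--         if not all(ch.isalnum() or ch == "_" for ch in part):
--             raise ValueError(f"Unsafe identifier: {name}")
--     return ".".join(parts)
-- ===== SOURCE B (Python) =====
-- def _safe_identifier(name: str) -> str:
--     if not name:
--         raise ValueError("Identifier cannot be empty.")
--     for ch in name:
--         if not (ch.isalnum() or ch == "_" or ch == "."):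
--             raise ValueError(f"Unsafe identifier: {name}")
--     return name
-- ===== Notes on version B (the rewrite author's own statement) =====
-- stated objective: simpler
-- what changed: B drops the split/join pipeline and the per-part nested all() scan: one flat pass over the characters accepting alphanumerics, underscores and dots, then name is returned unchanged.
import Mathlib
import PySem

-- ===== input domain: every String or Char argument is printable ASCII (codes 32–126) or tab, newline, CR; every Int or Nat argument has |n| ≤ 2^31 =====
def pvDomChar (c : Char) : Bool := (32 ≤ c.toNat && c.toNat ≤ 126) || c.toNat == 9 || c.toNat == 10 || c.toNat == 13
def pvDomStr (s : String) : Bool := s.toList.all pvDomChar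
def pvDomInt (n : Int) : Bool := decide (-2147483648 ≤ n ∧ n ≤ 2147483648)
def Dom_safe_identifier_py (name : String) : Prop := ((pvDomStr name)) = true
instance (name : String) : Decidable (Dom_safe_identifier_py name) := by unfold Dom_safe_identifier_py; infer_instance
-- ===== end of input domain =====

-- B validates in one flat pass over the characters and returns name unchanged (no split/join); return values agree with A wherever A returns.

-- ===== PORT A =====
-- part passes A's inner all(): every char alphanumeric or underscore
def pvPartOk (part : List Char) : Bool :=
  part.all (fun ch => PySem.Chars.isalnum ch || ch == '_')

def safe_identifier_py (name : String) : String :=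
  if name.toList = [] then ""   -- raise ValueError("Identifier cannot be empty."): outside Pre_
  else
    let parts := PySem.Chars.splitOn name.toList ['.']
    if parts.all pvPartOk then String.ofList (PySem.Chars.join ['.'] parts)
    else ""                     -- raise ValueError(f"Unsafe identifier: {name}"): outside Pre_

-- ===== PORT B =====
def pvChOk (ch : Char) : Bool :=
  PySem.Chars.isalnum ch || ch == '_' || ch == '.'

def safe_identifier_py_alt (name : String) : String :=
  if name.toList = [] then ""   -- raise: outside Pre_
  else if name.toList.all pvChOk then name
  else ""                       -- raise: outside Pre_

-- ===== PRECONDITION & SPEC =====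
-- Pre_ is exactly where the Python A returns (no ValueError): nonempty, all chars alphanumeric, underscore or dot
def Pre_safe_identifier_py (name : String) : Prop :=
  name.toList ≠ [] ∧ name.toList.all pvChOk = true
instance (name : String) : Decidable (Pre_safe_identifier_py name) := by
  unfold Pre_safe_identifier_py; infer_instance

def pvWitness_safe_identifier_py : String := "app.main_v2"

def Spec_safe_identifier_py (name : String) (out : String) : Prop := out = safe_identifier_py_alt name
instance (name : String) (out : String) : Decidable (Spec_safe_identifier_py name out) := by unfold Spec_safe_identifier_py; infer_instance

-- ===== CLAIM (what is proved, stated in full; the proofs are below) =====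
def Claim_equal_safe_identifier_py : Prop := ∀ (name : String), Dom_safe_identifier_py name → Pre_safe_identifier_py name → Spec_safe_identifier_py name (safe_identifier_py name)

-- ===== LEMMAS AND PROOFS =====

-- invariant of splitOn's worker for a single-char separator: the result appends to acc.reverse
-- a nonempty list of parts whose join restores cur.reverse ++ l, no part contains d,
-- and every part char comes from cur or l
theorem pv_go_spec (d : Char) :
    ∀ (fuel : Nat) (l cur : List Char) (acc : List (List Char)),
      l.length < fuel → d ∉ cur →
      ∃ r, PySem.Chars.splitOn.go [d] fuel l cur acc = acc.reverse ++ r ∧ r ≠ [] ∧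
           PySem.Chars.join [d] r = cur.reverse ++ l ∧
           (∀ p ∈ r, d ∉ p) ∧ (∀ p ∈ r, ∀ ch ∈ p, ch ∈ cur ∨ ch ∈ l) := by
  intro fuel
  induction fuel with
  | zero => intro l cur acc h; omega
  | succ fuel ih =>
    intro l cur acc hfuel hcur
    cases l with
    | nil =>
      refine ⟨[cur.reverse], ?_, by simp, by simp [PySem.Chars.join, List.intercalate, List.intersperse], ?_, ?_⟩
      · simp [PySem.Chars.splitOn.go]
      · intro p hp; simp at hp; subst hp; simpa using hcur
      · intro p hp ch hch; simp at hp; subst hp; simp at hch; exact Or.inl hch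
    | cons c rest =>
      by_cases hpre : List.isPrefixOf [d] (c :: rest) = true
      · have hcd : c = d := by
          simp [List.isPrefixOf] at hpre; exact hpre.symm
        obtain ⟨r', heq, hne, hjoin, hnod, hmem⟩ :=
          ih rest [] (cur.reverse :: acc) (by simp at hfuel; omega) (by simp)
        refine ⟨cur.reverse :: r', ?_, by simp, ?_, ?_, ?_⟩
        · simp only [PySem.Chars.splitOn.go, hpre, if_pos]
          simp at heq ⊢
          convert heq using 2
        · cases r' with
          | nil => exact absurd rfl hne
          | cons a t =>
            have : PySem.Chars.join [d] (cur.reverse :: a :: t) =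
                cur.reverse ++ [d] ++ PySem.Chars.join [d] (a :: t) := by
              simp [PySem.Chars.join, List.intercalate, List.intersperse]
            rw [this, hjoin]; simp [hcd]
        · intro p hp
          rcases List.mem_cons.mp hp with hp | hp
          · subst hp; simpa using hcur
          · exact hnod p hp
        · intro p hp ch hch
          rcases List.mem_cons.mp hp with hp | hp
          · subst hp; simp at hch; exact Or.inl hch
          · rcases hmem p hp ch hch with h | h
            · simp at h
            · exact Or.inr (List.mem_cons_of_mem _ h)
      · have hcd : c ≠ d := by
          simp [List.isPrefixOf] at hpre
          intro h; exact absurd h.symm hpre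
        obtain ⟨r', heq, hne, hjoin, hnod, hmem⟩ :=
          ih rest (c :: cur) acc (by simp at hfuel; omega)
            (fun h => (List.mem_cons.mp h).elim (fun h => hcd h.symm) hcur)
        refine ⟨r', ?_, hne, ?_, hnod, ?_⟩
        · simp only [PySem.Chars.splitOn.go, hpre]
          exact heq
        · rw [hjoin]; simp
        · intro p hp ch hch
          rcases hmem p hp ch hch with h | h
          · rcases List.mem_cons.mp h with h | h
            · subst h; exact Or.inr (List.mem_cons_self ..)
            · exact Or.inl h
          · exact Or.inr (List.mem_cons_of_mem _ h)

theorem pv_splitOn_spec (cs : List Char) (d : Char) :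
    ∃ r, PySem.Chars.splitOn cs [d] = r ∧
         PySem.Chars.join [d] r = cs ∧
         (∀ p ∈ r, d ∉ p) ∧ (∀ p ∈ r, ∀ ch ∈ p, ch ∈ cs) := by
  obtain ⟨r, heq, _, hjoin, hnod, hmem⟩ :=
    pv_go_spec d (cs.length + 1) cs [] [] (by omega) (by simp)
  refine ⟨r, ?_, by simpa using hjoin, hnod, ?_⟩
  · simpa [PySem.Chars.splitOn] using heq
  · intro p hp ch hch
    rcases hmem p hp ch hch with h | h
    · simp at h
    · exact h

-- ===== VERDICT (by name: the statement is the Claim_ definition above) =====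
theorem safe_identifier_py_spec : Claim_equal_safe_identifier_py := by
  intro name _ hpre
  obtain ⟨hne, hall⟩ := hpre
  unfold Spec_safe_identifier_py safe_identifier_py safe_identifier_py_alt
  rw [if_neg hne, if_neg hne, if_pos hall]
  obtain ⟨r, hsplit, hjoin, hnod, hmem⟩ := pv_splitOn_spec name.toList '.'
  have hok : r.all pvPartOk = true := by
    rw [List.all_eq_true]
    intro p hp
    rw [pvPartOk, List.all_eq_true]
    intro ch hch
    have hB : pvChOk ch = true := by
      rw [List.all_eq_true] at hall
      exact hall ch (hmem p hp ch hch)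
    have hnd : ch ≠ '.' := fun h => hnod p hp (h ▸ hch)
    simp [pvChOk] at hB
    rcases hB with (h | h) | h
    · simp [h]
    · simp [h]
    · exact absurd h hnd
  simp only [hsplit, hok, if_pos]
  rw [hjoin]
  exact String.ofList_toList
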